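-- pv_equiv track=rewrite | github.com/acalatrava/FrontWall | backend/shield/server.py | _is_path_safe
-- ===== SOURCE A (Python) =====
-- def _is_path_safe(path: str) -> bool:
--     """Prevent directory traversal and null byte attacks."""
--     if not path:
--         return True
--     if "\x00" in path:
--         return False
--     parts = path.replace("\\", "/").split("/")
--     for segment in parts:
--         if not segment:
--             continue
--         if segment == "..":
--             return False
--         if segment.startswith("."):
--             return False
--     return True
-- ===== SOURCE B (Python) =====
-- def _is_path_safe(path: str) -> bool:
--     """Prevent directory traversal and null byte attacks."""
--     if not path:
--         return True
--     if "\x00" in path: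
--         return False
--     norm = path.replace("\\", "/")
--     return not (norm.startswith(".") or "/." in norm)
-- ===== Notes on version B (the rewrite author's own statement) =====
-- stated objective: simpler
-- what changed: B drops the split-into-segments loop: after normalizing backslashes to '/', a segment starting with '.' (which subsumes the '..' case) exists iff the string starts with '.' or contains the substring '/.', so two substring tests replace the split and the per-segment scan.
import Mathlib
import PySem

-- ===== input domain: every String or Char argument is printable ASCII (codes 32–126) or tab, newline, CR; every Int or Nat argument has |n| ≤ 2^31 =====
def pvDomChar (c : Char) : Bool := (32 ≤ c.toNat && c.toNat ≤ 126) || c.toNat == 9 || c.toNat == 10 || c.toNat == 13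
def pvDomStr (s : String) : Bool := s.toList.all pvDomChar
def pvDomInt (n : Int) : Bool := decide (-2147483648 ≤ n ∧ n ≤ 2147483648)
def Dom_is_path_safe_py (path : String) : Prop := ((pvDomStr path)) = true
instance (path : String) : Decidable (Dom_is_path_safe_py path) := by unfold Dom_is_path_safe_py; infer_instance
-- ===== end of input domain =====

-- B replaces A's split-on-'/' segment loop by two substring tests on the
-- backslash-normalized path; objective: simpler (same O(n) cost).

-- ===== PORT A =====
-- the 'for segment in parts' loop of A, segment by segment, branches in order
def pvSegLoop : List (List Char) → Bool
  | [] => true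
  | seg :: rest =>
    if seg == [] then pvSegLoop rest
    else if seg == ['.', '.'] then false
    else if PySem.Chars.startswith seg ['.'] then false
    else pvSegLoop rest

def is_path_safe_py (path : String) : Bool :=
  if path == "" then true
  else if PySem.Str.isIn "\x00" path then false
  else
    pvSegLoop (PySem.Chars.splitOn (PySem.Str.replace path "\\" "/").toList ['/'])

-- ===== PORT B =====
def is_path_safe_py_alt (path : String) : Bool :=
  if path == "" then true
  else if PySem.Str.isIn "\x00" path then false
  else
    let norm := PySem.Str.replace path "\\" "/"
    !(PySem.Str.startswith norm "." || PySem.Str.isIn "/." norm)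

-- ===== PRECONDITION & SPEC =====
def Spec_is_path_safe_py (path : String) (out : Bool) : Prop := out = is_path_safe_py_alt path
instance (path : String) (out : Bool) : Decidable (Spec_is_path_safe_py path out) := by unfold Spec_is_path_safe_py; infer_instance

-- ===== CLAIM (what is proved, stated in full; the proofs are below) =====
def Claim_equal_is_path_safe_py : Prop := ∀ (path : String), Dom_is_path_safe_py path → Spec_is_path_safe_py path (is_path_safe_py path)

-- ===== LEMMAS AND PROOFS =====

-- fuel-free structural version of PySem.Chars.splitOn.go for sep = ['/']
def pvSpec : List Char → List Char → List (List Char) → List (List Char)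
  | [], cur, acc => (cur.reverse :: acc).reverse
  | c :: t, cur, acc => if c = '/' then pvSpec t [] (cur.reverse :: acc) else pvSpec t (c :: cur) acc

-- one-pass 'some segment starts with a dot' scanner; the flag says whether we
-- stand at the start of a segment
def pvBad : Bool → List Char → Bool
  | _, [] => false
  | atStart, c :: t => (atStart && c == '.') || pvBad (c == '/') t

def pvSegOk (s : List Char) : Bool := !(s.head? == some '.')

theorem pvGo_nil (n : Nat) (cur : List Char) (acc : List (List Char)) :
    PySem.Chars.splitOn.go ['/'] n [] cur acc = (cur.reverse :: acc).reverse := by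
  cases n <;> simp [PySem.Chars.splitOn.go]

theorem pvGo_cons (n : Nat) (c : Char) (t cur : List Char) (acc : List (List Char)) :
    PySem.Chars.splitOn.go ['/'] (n + 1) (c :: t) cur acc =
      if c = '/' then PySem.Chars.splitOn.go ['/'] n t [] (cur.reverse :: acc)
      else PySem.Chars.splitOn.go ['/'] n t (c :: cur) acc := by
  rw [PySem.Chars.splitOn.go.eq_def]
  by_cases hc : c = '/'
  · subst hc; simp
  · have hp : List.isPrefixOf ['/'] (c :: t) = false := by
      show (('/' == c) && List.isPrefixOf [] t) = false
      simp [Ne.symm hc]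
    simp [hp, hc]

theorem pvGo_eq_pvSpec : ∀ (fuel : Nat) (l cur : List Char) (acc : List (List Char)),
    l.length ≤ fuel → PySem.Chars.splitOn.go ['/'] fuel l cur acc = pvSpec l cur acc := by
  intro fuel
  induction fuel with
  | zero =>
    intro l cur acc h
    have hl : l = [] := List.length_eq_zero_iff.mp (Nat.le_zero.mp h)
    subst hl
    rw [pvGo_nil]; rfl
  | succ n ih =>
    intro l cur acc h
    cases l with
    | nil => rw [pvGo_nil]; rfl
    | cons c t =>
      rw [pvGo_cons]
      simp only [List.length_cons] at h
      by_cases hc : c = '/'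
      · rw [if_pos hc, ih t [] _ (by omega)]; subst hc; simp [pvSpec]
      · rw [if_neg hc, ih t (c :: cur) acc (by omega)]; simp [pvSpec, hc]

theorem pvSegLoop_eq_all : ∀ ls : List (List Char), pvSegLoop ls = ls.all pvSegOk := by
  intro ls
  induction ls with
  | nil => rfl
  | cons seg rest ih =>
    simp only [pvSegLoop, List.all_cons, ih]
    by_cases h0 : seg = []
    · subst h0; simp [pvSegOk]
    · rw [if_neg (by simpa using h0)]
      by_cases h1 : seg = ['.', '.']
      · subst h1; simp [pvSegOk]
      · rw [if_neg (by simpa using h1)]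
        by_cases h2 : PySem.Chars.startswith seg ['.'] = true
        · have : seg.head? = some '.' := by
            rcases (PySem.Chars.startswith_iff seg ['.']).mp h2 with ⟨u, hu⟩
            subst hu; rfl
          simp [h2, pvSegOk, this]
        · have h2' : PySem.Chars.startswith seg ['.'] = false := by simpa using h2
          have hh : (seg.head? == some '.') = false := by
            cases seg with
            | nil => rfl
            | cons a u =>
              have hne : ¬ ('.' = a) := by
                intro hd
                subst hd
                exact absurd ((PySem.Chars.startswith_iff (('.') :: u) ['.']).mpr ⟨u, rfl⟩)
                  (by simp [h2'])
              show ((some a) == some '.') = false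
              simp only [beq_eq_false_iff_ne, ne_eq, Option.some.injEq]
              exact fun h => hne h.symm
          simp [h2', pvSegOk, hh]

theorem pvSpec_all : ∀ (l cur : List Char) (acc : List (List Char)),
    (pvSpec l cur acc).all pvSegOk =
      (acc.all pvSegOk &&
        (if cur = [] then !pvBad true l else (!(cur.getLast? == some '.') && !pvBad false l))) := by
  intro l
  induction l with
  | nil =>
    intro cur acc
    have hseg : pvSegOk cur.reverse = !(cur.getLast? == some '.') := by
      simp [pvSegOk, List.head?_reverse]
    cases cur with
    | nil => simp [pvSpec, pvBad, pvSegOk, Bool.and_comm]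
    | cons d ds =>
      simp only [pvSpec, List.all_reverse, List.all_cons, pvBad, Bool.not_false, Bool.and_true,
        if_neg (List.cons_ne_nil d ds), hseg, List.all_reverse]
      rw [Bool.and_comm]
  | cons c t ih =>
    intro cur acc
    by_cases hc : c = '/'
    · subst hc
      have hps : pvSpec ('/' :: t) cur acc = pvSpec t [] (cur.reverse :: acc) := by
        simp [pvSpec]
      have hbadT : pvBad true ('/' :: t) = pvBad true t := by simp [pvBad]
      have hbadF : pvBad false ('/' :: t) = pvBad true t := by simp [pvBad]
      have hseg : pvSegOk cur.reverse = !(cur.getLast? == some '.') := by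
        simp [pvSegOk, List.head?_reverse]
      rw [hps, ih, List.all_cons, hseg]
      cases cur with
      | nil => simp [hbadT]
      | cons d ds =>
        rw [if_neg (List.cons_ne_nil d ds), hbadF]
        simp [Bool.and_comm, Bool.and_left_comm]
    · have hcb : (c == '/') = false := by simpa using hc
      simp only [pvSpec, if_neg hc, ih, if_neg (List.cons_ne_nil c cur)]
      cases cur with
      | nil =>
        have hbt : pvBad true (c :: t) = ((c == '.') || pvBad false t) := by
          simp [pvBad, hcb]
        rw [if_pos rfl, hbt]
        simp only [List.getLast?_singleton, Bool.not_or]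
        rfl
      | cons d ds =>
        have h1 : (c :: d :: ds).getLast? = (d :: ds).getLast? := by
          simp [List.getLast?_cons_cons]
        have h2 : pvBad false (c :: t) = pvBad false t := by simp [pvBad, hcb]
        rw [if_neg (List.cons_ne_nil d ds), h1, h2]

theorem pvBad_iff : ∀ (cs : List Char) (b : Bool),
    pvBad b cs = true ↔ ((b = true ∧ ['.'] <+: cs) ∨ ['/', '.'] <:+: cs) := by
  intro cs
  induction cs with
  | nil =>
    intro b
    simp only [pvBad, Bool.false_eq_true, false_iff]
    rintro (⟨_, ⟨u, hu⟩⟩ | ⟨u, v, huv⟩)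
    · exact absurd hu (by simp)
    · exact absurd huv (by simp)
  | cons c t ih =>
    intro b
    simp only [pvBad, Bool.or_eq_true, Bool.and_eq_true, beq_iff_eq, ih]
    constructor
    · rintro (⟨hb, hc⟩ | ⟨hs, hp⟩ | hinf)
      · exact Or.inl ⟨hb, by simp [hc]⟩
      · subst hs
        obtain ⟨u, hu⟩ := hp
        subst hu
        exact Or.inr (List.infix_cons_iff.mpr (Or.inl ⟨u, rfl⟩))
      · exact Or.inr (List.infix_cons_iff.mpr (Or.inr hinf))
    · rintro (⟨hb, hp⟩ | hinf)
      · obtain ⟨u, hu⟩ := hp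
        injection hu with h1 _
        exact Or.inl ⟨hb, h1.symm⟩
      · rcases List.infix_cons_iff.mp hinf with hp | hinf
        · obtain ⟨u, hu⟩ := hp
          injection hu with h1 h2
          refine Or.inr (Or.inl ⟨by simp [h1.symm], ⟨u, ?_⟩⟩)
          simpa using h2
        · exact Or.inr (Or.inr hinf)

theorem pvMain (cs : List Char) :
    pvSegLoop (PySem.Chars.splitOn cs ['/']) =
      !(PySem.Chars.startswith cs ['.'] || PySem.Chars.isIn ['/', '.'] cs) := by
  have h1 : PySem.Chars.splitOn cs ['/'] = pvSpec cs [] [] := by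
    rw [PySem.Chars.splitOn]
    exact pvGo_eq_pvSpec (cs.length + 1) cs [] [] (by omega)
  rw [h1, pvSegLoop_eq_all, pvSpec_all]
  simp only [List.all_nil, Bool.true_and]
  by_cases h : pvBad true cs = true
  · rcases (pvBad_iff cs true).mp h with ⟨_, hp⟩ | hinf
    · rw [h, (PySem.Chars.startswith_iff cs ['.']).mpr hp]; simp
    · rw [h, (PySem.Chars.isIn_iff_infix ['/', '.'] cs).mpr hinf]; simp
  · have hb : pvBad true cs = false := by simpa using h
    have hns : PySem.Chars.startswith cs ['.'] = false := by
      by_contra hx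
      exact h ((pvBad_iff cs true).mpr (Or.inl ⟨rfl,
        (PySem.Chars.startswith_iff cs ['.']).mp (by simpa using hx)⟩))
    have hni : PySem.Chars.isIn ['/', '.'] cs = false := by
      by_contra hx
      exact h ((pvBad_iff cs true).mpr (Or.inr
        ((PySem.Chars.isIn_iff_infix ['/', '.'] cs).mp (by simpa using hx))))
    rw [hb, hns, hni]; rfl

-- ===== VERDICT (by name: the statement is the Claim_ definition above) =====
theorem is_path_safe_py_spec : Claim_equal_is_path_safe_py := by
  intro path _
  unfold Spec_is_path_safe_py is_path_safe_py is_path_safe_py_alt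
  by_cases h0 : (path == "") = true
  · simp only [if_pos h0]
  · simp only [if_neg h0]
    by_cases h1 : PySem.Str.isIn "\x00" path = true
    · simp only [if_pos h1]
    · simp only [if_neg h1]
      rw [pvMain (PySem.Str.replace path "\\" "/").toList]
      rfl
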